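-- pv_equiv track=rewrite | github.com/HTCho1/CodingTest | Programmers/Level 3/징검다리 건너기.py | check
-- ===== SOURCE A (Python) =====
-- def check(stones, mid, k):
--     skip = 0
--     for stone in stones:
--         if stone < mid:
--             skip += 1
--             if skip >= k:
--                 return 0
--         else:
--             skip = 0
--     return 1
-- ===== SOURCE B (Python) =====
-- def check(stones, mid, k):
--     # Build the lengths of maximal runs of stones below mid, then test them.
--     runs = []
--     n = len(stones)
--     i = 0
--     while i < n:
--         if stones[i] < mid:
--             j = i
--             while j < n and stones[j] < mid:
--                 j += 1
--             runs.append(j - i)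
--             i = j
--         else:
--             i += 1
--     return 0 if any(r >= k for r in runs) else 1
-- ===== Notes on version B (the rewrite author's own statement) =====
-- stated objective: alternative
-- what changed: B builds the lengths of the maximal runs of below-threshold stones with a two-pointer scan and then tests whether any run length reaches k, instead of A's single inline skip counter with an early return.
import Mathlib
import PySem

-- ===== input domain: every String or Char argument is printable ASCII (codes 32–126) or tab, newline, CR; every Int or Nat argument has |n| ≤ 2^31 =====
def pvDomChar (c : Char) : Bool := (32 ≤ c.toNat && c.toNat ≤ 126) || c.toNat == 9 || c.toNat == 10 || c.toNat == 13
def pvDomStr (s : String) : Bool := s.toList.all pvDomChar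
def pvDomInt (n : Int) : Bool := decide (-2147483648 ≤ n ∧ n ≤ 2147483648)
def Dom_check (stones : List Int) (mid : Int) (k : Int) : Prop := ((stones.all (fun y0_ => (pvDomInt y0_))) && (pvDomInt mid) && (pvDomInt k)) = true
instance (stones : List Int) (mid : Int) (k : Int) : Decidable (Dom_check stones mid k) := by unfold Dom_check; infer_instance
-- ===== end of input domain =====

-- B builds the maximal below-mid run lengths (two-pointer grouping) and then tests
-- whether any run reaches k; same return value as A's inline counter on all inputs.
-- ===== PORT A =====
-- A's for-loop with the running `skip` counter and early return.
def checkLoop (stones : List Int) (mid : Int) (k : Int) (skip : Int) : Int :=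
  match stones with
  | [] => 1
  | stone :: rest =>
    if stone < mid then
      if skip + 1 ≥ k then 0 else checkLoop rest mid k (skip + 1)
    else checkLoop rest mid k 0

def check (stones : List Int) (mid : Int) (k : Int) : Int :=
  checkLoop stones mid k 0

-- ===== PORT B =====
-- length of the leading run of below-mid stones (Source B's inner `while j < n and stones[j] < mid`)
def belowLen (stones : List Int) (mid : Int) : Nat :=
  match stones with
  | [] => 0
  | s :: rest => if s < mid then belowLen rest mid + 1 else 0

-- Source B's outer while loop: the list of maximal below-mid run lengths
def runsBelow (stones : List Int) (mid : Int) : List Nat :=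
  match stones with
  | [] => []
  | s :: rest =>
    if s < mid then
      (belowLen rest mid + 1) :: runsBelow (rest.drop (belowLen rest mid)) mid
    else
      runsBelow rest mid
termination_by stones.length
decreasing_by all_goals (simp [List.length_drop]; try omega)

def check_alt (stones : List Int) (mid : Int) (k : Int) : Int :=
  if (runsBelow stones mid).any (fun r => k ≤ (r : Int)) then 0 else 1

-- ===== PRECONDITION & SPEC =====
def Spec_check (stones : List Int) (mid : Int) (k : Int) (out : Int) : Prop := out = check_alt stones mid k
instance (stones : List Int) (mid : Int) (k : Int) (out : Int) : Decidable (Spec_check stones mid k out) := by unfold Spec_check; infer_instance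

-- ===== CLAIM (what is proved, stated in full; the proofs are below) =====
def Claim_equal_check : Prop := ∀ (stones : List Int) (mid : Int) (k : Int), Dom_check stones mid k → Spec_check stones mid k (check stones mid k)

-- ===== LEMMAS AND PROOFS =====

-- ===== VERDICT (by name: the statement is the Claim_ definition above) =====
-- `checkLoop` jumps over one whole below-mid run: it returns 0 iff the run is
-- nonempty and `skip` plus its length reaches k, else continues after the run.
theorem checkLoop_run (mid k : Int) :
    ∀ (l : List Int) (skip : Int),
      checkLoop l mid k skip =
        if 0 < belowLen l mid ∧ k ≤ skip + (belowLen l mid : Int) then 0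
        else checkLoop (l.drop (belowLen l mid)) mid k (skip + (belowLen l mid : Int)) := by
  intro l
  induction l with
  | nil => intro skip; simp [checkLoop, belowLen]
  | cons s r ih =>
    intro skip
    by_cases hs : s < mid
    · simp only [checkLoop, belowLen, hs, if_pos]
      by_cases hk : skip + 1 ≥ k
      · have h1 : 0 < belowLen r mid + 1 ∧ k ≤ skip + ((belowLen r mid + 1 : Nat) : Int) := by
          constructor
          · omega
          · push_cast; omega
        simp [hk, h1]
        omega
      · have h2 : ¬ (skip + 1 ≥ k) := hk
        rw [if_neg h2, ih (skip + 1)]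
        by_cases hc : k ≤ skip + ((belowLen r mid + 1 : Nat) : Int)
        · have hb : 0 < belowLen r mid := by
            by_contra hb0
            have : belowLen r mid = 0 := by omega
            rw [this] at hc; push_cast at hc; omega
          have hc' : 0 < belowLen r mid ∧ k ≤ (skip + 1) + (belowLen r mid : Int) := by
            push_cast at hc; exact ⟨hb, by omega⟩
          have hc'' : 0 < belowLen r mid + 1 ∧ k ≤ skip + ((belowLen r mid + 1 : Nat) : Int) := by
            push_cast; push_cast at hc; exact ⟨by omega, by omega⟩
          simp [hc', hc'']
          omega
        · have hc' : ¬ (0 < belowLen r mid ∧ k ≤ (skip + 1) + (belowLen r mid : Int)) := by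
            push_cast at hc ⊢; omega
          have hc'' : ¬ (0 < belowLen r mid + 1 ∧ k ≤ skip + ((belowLen r mid + 1 : Nat) : Int)) := by
            push_cast at hc ⊢; omega
          rw [if_neg hc', if_neg hc'']
          have harg : (skip + 1) + (belowLen r mid : Int) = skip + ((belowLen r mid + 1 : Nat) : Int) := by
            push_cast; ring
          have hdrop : r.drop (belowLen r mid) = (s :: r).drop (belowLen r mid + 1) := by
            simp [List.drop]
          rw [harg, hdrop]
    · simp [checkLoop, belowLen, hs]

-- after dropping a full run, the list is empty or starts with a stone ≥ mid
theorem drop_belowLen (mid : Int) :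
    ∀ (l : List Int), l.drop (belowLen l mid) = [] ∨
      ∃ h t, l.drop (belowLen l mid) = h :: t ∧ ¬ h < mid := by
  intro l
  induction l with
  | nil => left; simp [belowLen]
  | cons s r ih =>
    by_cases hs : s < mid
    · simpa [belowLen, hs, List.drop] using ih
    · right; exact ⟨s, r, by simp [belowLen, hs], hs⟩

theorem check_eq_alt (mid k : Int) :
    ∀ (n : Nat) (l : List Int), l.length ≤ n → check l mid k = check_alt l mid k := by
  intro n
  induction n with
  | zero =>
    intro l hl
    have : l = [] := List.eq_nil_of_length_eq_zero (by omega)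
    subst this
    simp [check, checkLoop, check_alt, runsBelow]
  | succ n ih =>
    intro l hl
    match l with
    | [] => simp [check, checkLoop, check_alt, runsBelow]
    | s :: r =>
      by_cases hs : s < mid
      · have hrun := checkLoop_run mid k (s :: r) 0
        have hB : belowLen (s :: r) mid = belowLen r mid + 1 := by simp [belowLen, hs]
        by_cases hk : k ≤ ((belowLen r mid + 1 : Nat) : Int)
        · have hcond : 0 < belowLen (s :: r) mid ∧ k ≤ (0 : Int) + (belowLen (s :: r) mid : Int) := by
            rw [hB]; exact ⟨by omega, by push_cast at hk ⊢; omega⟩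
          rw [check, hrun, if_pos hcond]
          have : (runsBelow (s :: r) mid).any (fun r' => k ≤ (r' : Int)) = true := by
            simp [runsBelow, hs]
            left
            push_cast at hk
            omega
          simp [check_alt, this]
        · have hcond : ¬ (0 < belowLen (s :: r) mid ∧ k ≤ (0 : Int) + (belowLen (s :: r) mid : Int)) := by
            rw [hB]; push_cast at hk ⊢; omega
          rw [check, hrun, if_neg hcond]
          -- the remaining list after the run
          set l' := (s :: r).drop (belowLen (s :: r) mid) with hl'
          have hlen' : l'.length ≤ n := by
            have : l'.length = (s :: r).length - belowLen (s :: r) mid := by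
              simp [hl', List.length_drop]
            rw [this, hB]
            simp at hl ⊢
            omega
          have hrest : checkLoop l' mid k ((0 : Int) + (belowLen (s :: r) mid : Int)) = check_alt l' mid k := by
            rcases drop_belowLen mid (s :: r) with hnil | ⟨h, t, heq, hge⟩
            · rw [hl', hnil]; simp [checkLoop, check_alt, runsBelow]
            · rw [hl', heq]
              have hchk : checkLoop (h :: t) mid k ((0 : Int) + (belowLen (s :: r) mid : Int)) = check t mid k := by
                simp [checkLoop, hge, check]
              have halt : check_alt (h :: t) mid k = check_alt t mid k := by
                simp [check_alt, runsBelow, hge]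
              have htlen : t.length ≤ n := by
                have := hlen'
                rw [hl', heq] at this
                simp at this
                omega
              rw [hchk, halt]
              exact ih t htlen
          rw [hrest]
          have halt2 : check_alt (s :: r) mid k = check_alt l' mid k := by
            have : runsBelow (s :: r) mid = (belowLen r mid + 1) :: runsBelow (r.drop (belowLen r mid)) mid := by
              simp [runsBelow, hs]
            have hdrop2 : l' = r.drop (belowLen r mid) := by
              rw [hl', hB]; simp [List.drop]
            simp only [check_alt, this, List.any_cons, hdrop2]
            have hk' : ¬ (k ≤ (belowLen r mid : Int) + 1) := by push_cast at hk; omega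
            simp [hk']
          rw [halt2]
      · have h1 : check (s :: r) mid k = check r mid k := by
          simp [check, checkLoop, hs]
        have h2 : check_alt (s :: r) mid k = check_alt r mid k := by
          simp [check_alt, runsBelow, hs]
        rw [h1, h2]
        exact ih r (by simp at hl; omega)

-- ===== VERDICT (by name: the statement is the Claim_ definition above) =====
theorem check_spec : Claim_equal_check := by
  intro stones mid k _
  unfold Spec_check
  exact check_eq_alt mid k stones.length stones le_rfl
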